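-- pv_equiv track=rewrite | github.com/BraxTos/EmbeddedSystems | CNVRT/convertor.py | contour_to_commands
-- ===== SOURCE A (Python) =====
-- DIRS = {
--     (1, 0): 0,
--     (0, 1): 90,
--     (-1, 0): 180,
--     (0, -1): 270
-- }
--
-- def turn(commands, current, target):
--     diff = (target - current) % 360
--     if diff == 90:
--         commands.append("R 90")
--     elif diff == 270:
--         commands.append("R -90")
--     elif diff == 180:
--         commands.append("R 90")
--         commands.append("R 90")
--     return target
--
-- def contour_to_commands(contour, step):
--     commands = ["paintON"]
--     direction = 0
--
--     cx, cy = contour[0]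
--
--     for nx, ny in contour[1:]:
--         dx, dy = nx - cx, ny - cy
--
--         if (dx, dy) not in DIRS:
--             continue
--
--         target_dir = DIRS[(dx, dy)]
--         direction = turn(commands, direction, target_dir)
--         commands.append(f"F {step}")
--
--         cx, cy = nx, ny
--
--     commands.append("paintOFF")
--     return commands
-- ===== SOURCE B (Python) =====
-- DIRS = {
--     (1, 0): 0,
--     (0, 1): 90,
--     (-1, 0): 180,
--     (0, -1): 270
-- }
--
-- def contour_to_commands(contour, step):
--     # Phase 1: extract the list of headings (unit steps only; the reference
--     # position only advances on an accepted unit step).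
--     cx, cy = contour[0]
--     headings = []
--     for nx, ny in contour[1:]:
--         d = DIRS.get((nx - cx, ny - cy))
--         if d is not None:
--             headings.append(d)
--             cx, cy = nx, ny
--     # Phase 2: encode the headings as turn/forward commands.
--     commands = ["paintON"]
--     direction = 0
--     for h in headings:
--         diff = (h - direction) % 360
--         if diff == 90:
--             commands.append("R 90")
--         elif diff == 270:
--             commands.append("R -90")
--         elif diff == 180:
--             commands.append("R 90")
--             commands.append("R 90")
--         commands.append(f"F {step}")
--         direction = h
--     commands.append("paintOFF")
--     return commands
-- ===== Notes on version B (the rewrite author's own statement) =====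
-- stated objective: alternative
-- what changed: A's single fused loop (turning and moving while walking the contour) is split into two passes: first extract the list of unit-step headings, then encode that heading list into turn/forward commands.
import Mathlib
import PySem

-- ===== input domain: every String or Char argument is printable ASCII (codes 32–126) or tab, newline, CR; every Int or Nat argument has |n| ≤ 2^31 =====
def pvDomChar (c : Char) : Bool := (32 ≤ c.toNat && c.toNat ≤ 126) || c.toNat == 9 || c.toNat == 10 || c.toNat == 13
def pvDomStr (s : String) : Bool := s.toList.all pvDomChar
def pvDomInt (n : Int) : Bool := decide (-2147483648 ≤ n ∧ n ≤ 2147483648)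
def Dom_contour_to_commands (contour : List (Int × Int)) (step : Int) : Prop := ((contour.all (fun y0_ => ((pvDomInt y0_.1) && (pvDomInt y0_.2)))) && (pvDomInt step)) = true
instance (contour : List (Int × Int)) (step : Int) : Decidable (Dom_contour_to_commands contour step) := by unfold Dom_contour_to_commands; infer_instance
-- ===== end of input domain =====

-- B restructures A's fused walk-and-emit loop into two passes (extract headings, then
-- encode them as commands); same cost, return values proved equal on nonempty contours.

-- ===== PORT A =====
def DIRS : PySem.Dict (Int × Int) Int :=
  PySem.Dict.ofList [((1, 0), 0), ((0, 1), 90), ((-1, 0), 180), ((0, -1), 270)]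

def turn (commands : List String) (current target : Int) : List String × Int :=
  let diff := PySem.Int.mod (target - current) 360
  if diff = 90 then (commands ++ ["R 90"], target)
  else if diff = 270 then (commands ++ ["R -90"], target)
  else if diff = 180 then (commands ++ ["R 90", "R 90"], target)
  else (commands, target)

-- loop body of A's for-loop over contour[1:], state = (commands, direction, cx, cy)
def aStep (step : Int) (s : List String × Int × Int × Int) (p : Int × Int) :
    List String × Int × Int × Int :=
  match PySem.Dict.get? DIRS (p.1 - s.2.2.1, p.2 - s.2.2.2) with
  | none => s
  | some target_dir =>
    let r := turn s.1 s.2.1 target_dir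
    (r.1 ++ ["F " ++ PySem.Int.toStr step], r.2, p.1, p.2)

def contour_to_commands (contour : List (Int × Int)) (step : Int) : List String :=
  match contour with
  | [] => []   -- Python raises IndexError on contour[0]; excluded by Pre_
  | (x0, y0) :: rest =>
    (rest.foldl (aStep step) (["paintON"], 0, x0, y0)).1 ++ ["paintOFF"]

-- ===== PORT B =====
-- phase-1 loop body: state = (headings, cx, cy)
def b1Step (s : List Int × Int × Int) (p : Int × Int) : List Int × Int × Int :=
  match PySem.Dict.get? DIRS (p.1 - s.2.1, p.2 - s.2.2) with
  | some d => (s.1 ++ [d], p.1, p.2)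
  | none => s

-- phase-2 loop body: state = (commands, direction)
def b2Step (step : Int) (s : List String × Int) (h : Int) : List String × Int :=
  let diff := PySem.Int.mod (h - s.2) 360
  let c :=
    if diff = 90 then s.1 ++ ["R 90"]
    else if diff = 270 then s.1 ++ ["R -90"]
    else if diff = 180 then s.1 ++ ["R 90", "R 90"]
    else s.1
  (c ++ ["F " ++ PySem.Int.toStr step], h)

def contour_to_commands_alt (contour : List (Int × Int)) (step : Int) : List String :=
  match contour with
  | [] => []   -- Python raises IndexError on contour[0]; excluded by Pre_
  | (x0, y0) :: rest =>
    let headings := (rest.foldl b1Step ([], x0, y0)).1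
    (headings.foldl (b2Step step) (["paintON"], 0)).1 ++ ["paintOFF"]

-- ===== PRECONDITION & SPEC =====
-- Pre_ excludes only the empty contour, on which A raises IndexError at contour[0].
def Pre_contour_to_commands (contour : List (Int × Int)) (step : Int) : Prop :=
  contour ≠ []
instance (contour : List (Int × Int)) (step : Int) : Decidable (Pre_contour_to_commands contour step) := by unfold Pre_contour_to_commands; infer_instance

def pvWitness_contour_to_commands : (List (Int × Int)) × Int :=
  ([(0, 0), (1, 0), (1, 1), (0, 1)], 2)

def Spec_contour_to_commands (contour : List (Int × Int)) (step : Int) (out : List String) : Prop := out = contour_to_commands_alt contour step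
instance (contour : List (Int × Int)) (step : Int) (out : List String) : Decidable (Spec_contour_to_commands contour step out) := by unfold Spec_contour_to_commands; infer_instance

-- ===== CLAIM (what is proved, stated in full; the proofs are below) =====
def Claim_equal_contour_to_commands : Prop := ∀ (contour : List (Int × Int)) (step : Int), Dom_contour_to_commands contour step → Pre_contour_to_commands contour step → Spec_contour_to_commands contour step (contour_to_commands contour step)

-- ===== LEMMAS AND PROOFS =====

-- recursive characterisation of phase 1's headings list
def hdsRec : List (Int × Int) → Int → Int → List Int
  | [], _, _ => []
  | p :: r, cx, cy =>
    match PySem.Dict.get? DIRS (p.1 - cx, p.2 - cy) with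
    | some d => d :: hdsRec r p.1 p.2
    | none => hdsRec r cx cy

theorem b1_fold (r : List (Int × Int)) : ∀ (hs : List Int) (cx cy : Int),
    (r.foldl b1Step (hs, cx, cy)).1 = hs ++ hdsRec r cx cy := by
  induction r with
  | nil => intro hs cx cy; simp [hdsRec]
  | cons p r ih =>
    intro hs cx cy
    simp only [List.foldl_cons, b1Step, hdsRec]
    cases PySem.Dict.get? DIRS (p.1 - cx, p.2 - cy) with
    | none => exact ih hs cx cy
    | some d => simp [ih]

theorem step_agree (step : Int) (cmds : List String) (dir t : Int) :
    b2Step step (cmds, dir) t =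
      ((turn cmds dir t).1 ++ ["F " ++ PySem.Int.toStr step], (turn cmds dir t).2) := by
  simp only [b2Step, turn]
  split_ifs <;> rfl

theorem main_fold (step : Int) (r : List (Int × Int)) :
    ∀ (cmds : List String) (dir cx cy : Int),
    ((r.foldl (aStep step) (cmds, dir, cx, cy)).1,
     (r.foldl (aStep step) (cmds, dir, cx, cy)).2.1) =
      (hdsRec r cx cy).foldl (b2Step step) (cmds, dir) := by
  induction r with
  | nil => intro cmds dir cx cy; simp [hdsRec]
  | cons p r ih =>
    intro cmds dir cx cy
    simp only [List.foldl_cons, aStep, hdsRec]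
    cases PySem.Dict.get? DIRS (p.1 - cx, p.2 - cy) with
    | none => exact ih cmds dir cx cy
    | some t =>
      simp only [List.foldl_cons, step_agree]
      exact ih _ _ _ _

-- ===== VERDICT (by name: the statement is the Claim_ definition above) =====
theorem contour_to_commands_spec : Claim_equal_contour_to_commands := by
  intro contour step _ hpre
  unfold Spec_contour_to_commands
  match contour with
  | [] => exact absurd rfl hpre
  | (x0, y0) :: rest =>
    simp only [contour_to_commands, contour_to_commands_alt, b1_fold, List.nil_append]
    have h := main_fold step rest ["paintON"] 0 x0 y0
    have := congrArg Prod.fst h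
    simpa using congrArg (· ++ ["paintOFF"]) this
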